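-- pv_equiv track=rewrite | github.com/981377660LMT/algorithm-study | 13_回溯算法/经典bt/将11置为00-dp.py | solve
-- ===== SOURCE A (Python) =====
-- from functools import lru_cache
-- from typing import List
--
-- def solve(nums: List[int]) -> bool:
--     """Assuming you play first and play optimally, return whether you can win the game."""
--
--     @lru_cache(None)
--     def dfs(cur: str) -> bool:
--         if '11' not in cur:
--             return False
--         for i in range(len(cur) - 1):
--             if cur[i] == cur[i + 1] == '1':
--                 next = cur[:i] + '00' + cur[i + 2 :]
--                 if not dfs(next):
--                     return True
--         return False
--
--     return dfs(''.join(map(str, nums)))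
-- ===== SOURCE B (Python) =====
-- def solve(nums):
--     """Sprague-Grundy: the position splits into independent maximal runs of '1'
--     in the digit string; a move removes two adjacent ones from one run, splitting
--     it.  Grundy numbers of runs are computed by an O(n^2) mex DP and XORed."""
--     s = ''.join(map(str, nums))
--     runs = []
--     cnt = 0
--     for ch in s:
--         if ch == '1':
--             cnt += 1
--         else:
--             if cnt > 0:
--                 runs.append(cnt)
--             cnt = 0
--     if cnt > 0:
--         runs.append(cnt)
--     m = 0
--     for r in runs:
--         m = max(m, r)
--     g = [0] * (m + 1)
--     for n in range(2, m + 1):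
--         moves = [g[a] ^ g[n - 2 - a] for a in range(n - 1)]
--         v = 0
--         while v in moves:
--             v += 1
--         g[n] = v
--     x = 0
--     for r in runs:
--         x ^= g[r]
--     return x != 0
-- ===== Notes on version B (the rewrite author's own statement) =====
-- stated objective: faster
-- what changed: A searches the whole game tree over string states (memoized dfs over every reachable string); B decomposes the position into its maximal runs of '1', computes Sprague-Grundy numbers of run lengths by an O(n^2) mex DP and returns whether their XOR is nonzero.
import Mathlib
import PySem

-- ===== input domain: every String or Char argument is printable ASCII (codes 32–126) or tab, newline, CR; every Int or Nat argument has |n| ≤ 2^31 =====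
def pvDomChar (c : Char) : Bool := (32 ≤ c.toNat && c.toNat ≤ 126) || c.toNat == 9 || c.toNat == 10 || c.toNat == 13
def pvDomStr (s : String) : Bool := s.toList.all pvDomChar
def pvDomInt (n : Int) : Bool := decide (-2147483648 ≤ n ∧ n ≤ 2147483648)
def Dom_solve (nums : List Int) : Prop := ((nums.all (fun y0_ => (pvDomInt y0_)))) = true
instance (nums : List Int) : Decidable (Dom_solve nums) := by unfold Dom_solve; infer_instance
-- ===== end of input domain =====

-- B replaces A's exponential game search over whole strings by the Sprague–Grundy
-- decomposition: an O(n^2) mex DP over maximal runs of '1', XORed per run.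

-- ===== PORT A =====
-- A's memoized dfs over strings; the memoization does not change the value, so it is
-- ported as a plain recursion on a fuel that bounds the recursion depth (each move
-- removes two '1's, so `length + 1` fuel is never exhausted).
def dfsA : Nat → List Char → Bool
  | 0, _ => false
  | f+1, cur =>
    if PySem.Chars.isIn ['1', '1'] cur = false then false   -- if '11' not in cur: return False
    else
      -- for i in range(len(cur) - 1): if cur[i] == cur[i+1] == '1' and not dfs(next): return True
      (List.range (cur.length - 1)).any (fun i =>
        if PySem.List.pyGet? cur (i : Int) = some '1' ∧ PySem.List.pyGet? cur ((i : Int) + 1) = some '1' then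
          ! dfsA f (PySem.List.slice cur none (some (i : Int)) ++ ['0', '0'] ++
                    PySem.List.slice cur (some ((i : Int) + 2)) none)
        else false)

def solve (nums : List Int) : Bool :=
  let s := PySem.Str.join "" (nums.map PySem.Int.toStr)   -- ''.join(map(str, nums))
  dfsA (s.toList.length + 1) s.toList

-- ===== PORT B =====
-- maximal runs of '1' (the for-loop over the characters in Source B)
def runsB (s : List Char) : List Nat × Nat :=
  s.foldl
    (fun acc ch =>
      if ch = '1' then (acc.1, acc.2 + 1)
      else if 0 < acc.2 then (acc.1 ++ [acc.2], 0) else (acc.1, 0))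
    ([], 0)

-- `v = 0; while v in moves: v += 1` — the while loop, with fuel `len(moves) + 1`,
-- which the loop can never exhaust (it stops at the first value not in `moves`).
def mexLoop : Nat → Nat → List Nat → Nat
  | 0, v, _ => v
  | f+1, v, moves => if v ∈ moves then mexLoop f (v+1) moves else v

-- `g = [0] * (m + 1)` then `for n in range(2, m + 1): ... ; g[n] = v`
def gTab (m : Nat) : List Nat :=
  (List.range' 2 (m - 1)).foldl
    (fun g n =>
      let moves := (List.range (n - 1)).map (fun a => g.getD a 0 ^^^ g.getD (n - 2 - a) 0)
      g.set n (mexLoop (moves.length + 1) 0 moves))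
    (List.replicate (m + 1) 0)

def solve_alt (nums : List Int) : Bool :=
  let s := PySem.Str.join "" (nums.map PySem.Int.toStr)   -- ''.join(map(str, nums))
  let rc := runsB s.toList
  let runs := if 0 < rc.2 then rc.1 ++ [rc.2] else rc.1
  let m := runs.foldl max 0
  let g := gTab m
  decide (runs.foldl (fun x r => x ^^^ g.getD r 0) 0 ≠ 0)

-- ===== PRECONDITION & SPEC =====
def Spec_solve (nums : List Int) (out : Bool) : Prop := out = solve_alt nums
instance (nums : List Int) (out : Bool) : Decidable (Spec_solve nums out) := by unfold Spec_solve; infer_instance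

-- ===== CLAIM (what is proved, stated in full; the proofs are below) =====
def Claim_equal_solve : Prop := ∀ (nums : List Int), Dom_solve nums → Spec_solve nums (solve nums)

-- ===== LEMMAS AND PROOFS =====

-- maximal runs of '1's of a string, with an accumulator for a run in progress
def runsA : List Char → Nat → List Nat
  | [], c => if 0 < c then [c] else []
  | ch :: s, c => if ch = '1' then runsA s (c+1) else if 0 < c then c :: runsA s 0 else runsA s 0

-- abstract Grundy number of a run of n ones (mex over all splits)
def gr : Nat → Nat
  | 0 => 0
  | 1 => 0
  | n+2 => mexLoop (n+2) 0 ((List.range (n+1)).attach.map (fun a => gr a.1 ^^^ gr (n - a.1)))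
decreasing_by
  · exact Nat.lt_succ_of_lt (List.mem_range.mp a.2)
  · exact Nat.lt_succ_of_lt (Nat.lt_succ_of_le (Nat.sub_le n a.1))

def xorMap (l : List Nat) : Nat := l.foldr (· ^^^ ·) 0

-- Grundy value of a string position: XOR of gr over the runs
def xr (s : List Char) (c : Nat) : Nat := xorMap ((runsA s c).map gr)

def lead : List Char → Nat
  | [] => 0
  | ch :: s => if ch = '1' then lead s + 1 else 0

def ones (s : List Char) : Nat := s.count '1'

lemma gr_zero : gr 0 = 0 := by simp [gr]
lemma gr_one : gr 1 = 0 := by simp [gr]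

lemma gr_le_one (n : Nat) (h : n ≤ 1) : gr n = 0 := by
  interval_cases n
  · exact gr_zero
  · exact gr_one

lemma xorMap_cons (a : Nat) (l : List Nat) : xorMap (a :: l) = a ^^^ xorMap l := rfl

lemma xorMap_append (l1 l2 : List Nat) :
    xorMap (l1 ++ l2) = xorMap l1 ^^^ xorMap l2 := by
  induction l1 with
  | nil => simp [xorMap]
  | cons a l ih => rw [List.cons_append, xorMap_cons, xorMap_cons, ih, Nat.xor_assoc]

-- ---- mexLoop characterization ----
lemma filter_le_succ_length (x : List Nat) (v : Nat) :
    (x.filter (fun k => v ≤ k)).length = (x.filter (fun k => v + 1 ≤ k)).length + x.count v := by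
  induction x with
  | nil => simp
  | cons a x ih =>
    simp only [List.filter_cons, List.count_cons, decide_eq_true_eq, beq_iff_eq]
    rcases Nat.lt_trichotomy a v with h | h | h
    · rw [if_neg (by omega), if_neg (by omega), if_neg (by omega)]
      omega
    · subst h
      rw [if_pos (by omega), if_neg (by omega), if_pos rfl]
      simp only [List.length_cons]
      omega
    · rw [if_pos (by omega), if_pos (by omega), if_neg (by omega)]
      simp only [List.length_cons]
      omega

lemma mexLoop_notMem : ∀ (f v : Nat) (l : List Nat),
    (l.dedup.filter (fun k => v ≤ k)).length < f → mexLoop f v l ∉ l := by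
  intro f
  induction f with
  | zero => intro v l h; omega
  | succ f ih =>
    intro v l h
    by_cases hv : v ∈ l
    · simp only [mexLoop, hv, if_pos]
      apply ih
      have hd : v ∈ l.dedup := List.mem_dedup.mpr hv
      have hc : l.dedup.count v = 1 := List.count_eq_one_of_mem l.nodup_dedup hd
      have := filter_le_succ_length l.dedup v
      omega
    · simpa only [mexLoop, hv, if_neg, if_false] using hv

lemma mexLoop_mem_of_lt : ∀ (f v : Nat) (l : List Nat) (k : Nat),
    v ≤ k → k < mexLoop f v l → k ∈ l := by
  intro f
  induction f with
  | zero => intro v l k hv hk; simp only [mexLoop] at hk; omega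
  | succ f ih =>
    intro v l k hv hk
    simp only [mexLoop] at hk
    by_cases hm : v ∈ l
    · rw [if_pos hm] at hk
      rcases Nat.eq_or_lt_of_le hv with h | h
      · exact h ▸ hm
      · exact ih (v+1) l k h hk
    · rw [if_neg hm] at hk; omega

lemma gr_moves (n : Nat) :
    gr (n+2) = mexLoop (n+2) 0 ((List.range (n+1)).map (fun a => gr a ^^^ gr (n - a))) := by
  rw [gr]
  congr 1
  exact List.attach_map_val (l := List.range (n+1)) (f := fun a => gr a ^^^ gr (n - a))

lemma grP1 (k a : Nat) (h : a ≤ k) : gr (k+2) ≠ gr a ^^^ gr (k - a) := by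
  intro hEq
  set moves := (List.range (k+1)).map (fun a => gr a ^^^ gr (k - a)) with hm
  have hlen : (moves.dedup.filter (fun x => 0 ≤ x)).length < k + 2 := by
    have h1 : (moves.dedup.filter (fun x => 0 ≤ x)).length ≤ moves.dedup.length :=
      List.length_filter_le _ _
    have h2 : moves.dedup.length ≤ moves.length := (List.dedup_sublist _).length_le
    have h3 : moves.length = k + 1 := by simp [hm]
    omega
  have hnm := mexLoop_notMem (k+2) 0 moves hlen
  rw [← gr_moves] at hnm
  exact hnm (hEq ▸ List.mem_map.mpr ⟨a, List.mem_range.mpr (by omega), rfl⟩)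

lemma grP2 (k x : Nat) (h : x < gr (k+2)) : ∃ a, a ≤ k ∧ x = gr a ^^^ gr (k - a) := by
  rw [gr_moves] at h
  have := mexLoop_mem_of_lt (k+2) 0 _ x (Nat.zero_le x) h
  obtain ⟨a, ha, hEq⟩ := List.mem_map.mp this
  exact ⟨a, Nat.lt_succ_iff.mp (List.mem_range.mp ha), hEq.symm⟩

-- ---- xr equations ----
lemma xr_one (s : List Char) (c : Nat) : xr ('1' :: s) c = xr s (c+1) := by
  simp [xr, runsA]

lemma xr_other {ch : Char} (s : List Char) (c : Nat) (h : ch ≠ '1') :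
    xr (ch :: s) c = gr c ^^^ xr s 0 := by
  rcases Nat.eq_zero_or_pos c with rfl | hc
  · simp [xr, runsA, h, gr_zero, Nat.zero_xor]
  · simp [xr, runsA, h, hc, xorMap_cons]

lemma xr_nil (c : Nat) : xr [] c = gr c := by
  rcases Nat.eq_zero_or_pos c with rfl | hc
  · simp [xr, runsA, xorMap, gr_zero]
  · simp [xr, runsA, hc, xorMap, Nat.xor_zero]

lemma lead_cons_one (s : List Char) : lead ('1' :: s) = lead s + 1 := by simp [lead]

lemma lead_cons_other {ch : Char} (s : List Char) (h : ch ≠ '1') : lead (ch :: s) = 0 := by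
  simp [lead, h]

lemma head_one_of_lead_pos {s : List Char} (h : 0 < lead s) : ∃ t, s = '1' :: t := by
  cases s with
  | nil => simp [lead] at h
  | cons a t =>
    by_cases ha : a = '1'
    · exact ⟨t, by rw [ha]⟩
    · simp [lead, ha] at h

lemma runsA_lead (q : List Char) (c : Nat) (hc : 0 < c) :
    runsA q c = (c + lead q) :: runsA (q.drop (lead q)) 0 := by
  induction q generalizing c with
  | nil => simp [runsA, lead, hc]
  | cons a q ih =>
    by_cases ha : a = '1'
    · subst ha
      have h1 : runsA ('1' :: q) c = runsA q (c+1) := by simp [runsA]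
      rw [h1, ih (c+1) (by omega), lead_cons_one]
      have : c + 1 + lead q = c + (lead q + 1) := by omega
      rw [this, List.drop_succ_cons]
    · simp [runsA, ha, hc, lead]

lemma xr_lead (q : List Char) (c : Nat) :
    xr q c = gr (c + lead q) ^^^ xr (q.drop (lead q)) 0 := by
  rcases Nat.eq_zero_or_pos c with rfl | hc
  · cases q with
    | nil => simp [xr_nil, lead, gr_zero]
    | cons a q' =>
      by_cases ha : a = '1'
      · subst ha
        rw [xr_one, lead_cons_one, List.drop_succ_cons]
        rw [show xr q' 1 = xorMap ((runsA q' 1).map gr) from rfl,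
          runsA_lead q' 1 one_pos, Nat.add_comm 1 (lead q')]
        simp [xorMap_cons, xr]
      · rw [lead_cons_other _ ha]
        simp [gr_zero, Nat.zero_xor]
  · rw [show xr q c = xorMap ((runsA q c).map gr) from rfl, runsA_lead q c hc]
    simp [xorMap_cons, xr]

-- ---- no pair ⇒ value 0 ----
lemma pair_infix_replicate (c : Nat) (h : 2 ≤ c) (t : List Char) :
    ['1', '1'] <:+: (List.replicate c '1' ++ t) := by
  refine ⟨[], List.replicate (c - 2) '1' ++ t, ?_⟩
  have : c = 2 + (c - 2) := by omega
  rw [this, List.replicate_add]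
  simp [List.replicate]

lemma infix_ext {s : List Char} (pre : List Char) (a : Char)
    (h : ['1', '1'] <:+: s) : ['1', '1'] <:+: (pre ++ a :: s) := by
  obtain ⟨u, v, huv⟩ := h
  exact ⟨pre ++ a :: u, v, by rw [← huv]; simp⟩

lemma xr_eq_zero_of_noPair : ∀ (s : List Char) (c : Nat),
    ¬ (['1', '1'] <:+: (List.replicate c '1' ++ s)) → xr s c = 0 := by
  intro s
  induction s with
  | nil =>
    intro c h
    rw [xr_nil]
    apply gr_le_one
    by_contra hc
    exact h (pair_infix_replicate c (by omega) [])
  | cons a s ih =>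
    intro c h
    by_cases ha : a = '1'
    · subst ha
      rw [xr_one]
      apply ih (c+1)
      intro hp
      apply h
      rw [List.replicate_succ'] at hp
      simpa [List.append_assoc] using hp
    · rw [xr_other _ _ ha]
      have h1 : gr c = 0 := by
        apply gr_le_one
        by_contra hc
        exact h (pair_infix_replicate c (by omega) (a :: s))
      have h2 : xr s 0 = 0 := by
        apply ih 0
        intro hp
        simp only [List.replicate, List.nil_append] at hp
        exact h (infix_ext (List.replicate c '1') a hp)
      simp [h1, h2]


-- ---- move effect (M1) ----
lemma move_effect : ∀ (p : List Char) (c : Nat) (q : List Char),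
    ∃ a b, xr (p ++ '0' :: '0' :: q) c
      = xr (p ++ '1' :: '1' :: q) c ^^^ (gr (a+2+b) ^^^ (gr a ^^^ gr b)) := by
  intro p
  induction p with
  | nil =>
    intro c q
    refine ⟨c, lead q, ?_⟩
    simp only [List.nil_append]
    rw [xr_other _ _ (by decide), xr_other _ _ (by decide), xr_one, xr_one,
      xr_lead q 0, xr_lead q (c+2), gr_zero]
    simp only [Nat.zero_add, Nat.zero_xor]
    refine Nat.eq_of_testBit_eq fun i => ?_
    simp only [Nat.testBit_xor, Bool.xor_assoc]
    generalize (gr c).testBit i = b1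
    generalize (gr (lead q)).testBit i = b2
    generalize (gr (c + 2 + lead q)).testBit i = b3
    generalize (xr (q.drop (lead q)) 0).testBit i = b4
    cases b1 <;> cases b2 <;> cases b3 <;> cases b4 <;> rfl
  | cons a p ih =>
    intro c q
    by_cases ha : a = '1'
    · subst ha
      simp only [List.cons_append]
      obtain ⟨x, y, hxy⟩ := ih (c+1) q
      exact ⟨x, y, by rw [xr_one, xr_one, hxy]⟩
    · simp only [List.cons_append]
      obtain ⟨x, y, hxy⟩ := ih 0 q
      refine ⟨x, y, ?_⟩
      rw [xr_other _ _ ha, xr_other _ _ ha, hxy, ← Nat.xor_assoc]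

-- ---- move realization (LIFT) ----
lemma lift : ∀ (s : List Char) (c : Nat) (u : List Nat) (n : Nat) (v : List Nat),
    runsA s c = u ++ n :: v → ∀ a b, a + 2 + b = n → (u = [] → c ≤ a) →
    ∃ p q, s = p ++ '1' :: '1' :: q ∧
      xr (p ++ '0' :: '0' :: q) c
        = xorMap (u.map gr) ^^^ (gr a ^^^ (gr b ^^^ xorMap (v.map gr))) := by
  intro s
  induction s with
  | nil =>
    intro c u n v hr a b hab hcu
    by_cases hc : 0 < c
    · simp only [runsA, if_pos hc] at hr
      cases u with
      | nil =>
        simp only [List.nil_append] at hr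
        have h1 : n = c := (List.cons.injEq _ _ _ _ ▸ hr).1 |>.symm
        have := hcu rfl
        omega
      | cons x u' =>
        have hlen := congrArg List.length hr
        simp only [List.length_cons, List.length_append, List.length_nil] at hlen
        omega
    · simp only [runsA, if_neg hc] at hr
      exact absurd hr (by simp)
  | cons ch s ih =>
    intro c u n v hr a b hab hcu
    by_cases hch : ch = '1'
    · subst hch
      rw [show runsA ('1' :: s) c = runsA s (c+1) from by simp [runsA]] at hr
      cases u with
      | cons r u' =>
        obtain ⟨p, q, hpq, hx⟩ := ih (c+1) (r :: u') n v hr a b hab (by intro h; cases h)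
        refine ⟨'1' :: p, q, by rw [hpq]; rfl, ?_⟩
        rw [show ('1' :: p) ++ '0' :: '0' :: q = '1' :: (p ++ '0' :: '0' :: q) from rfl, xr_one]
        exact hx
      | nil =>
        have hca := hcu rfl
        rcases Nat.lt_or_ge c a with hlt | hge
        · obtain ⟨p, q, hpq, hx⟩ := ih (c+1) [] n v hr a b hab (fun _ => hlt)
          refine ⟨'1' :: p, q, by rw [hpq]; rfl, ?_⟩
          rw [show ('1' :: p) ++ '0' :: '0' :: q = '1' :: (p ++ '0' :: '0' :: q) from rfl, xr_one]
          exact hx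
        · have hac : a = c := Nat.le_antisymm hge hca
          subst hac
          rw [runsA_lead s (a+1) (by omega), List.nil_append] at hr
          have hn : a + 1 + lead s = n := (List.cons.injEq _ _ _ _ ▸ hr).1
          have hv : runsA (s.drop (lead s)) 0 = v := (List.cons.injEq _ _ _ _ ▸ hr).2
          have hlead : lead s = b + 1 := by omega
          obtain ⟨s'', rfl⟩ := head_one_of_lead_pos (by omega : 0 < lead s)
          refine ⟨[], s'', rfl, ?_⟩
          have hl2 : lead s'' = b := by rw [lead_cons_one] at hlead; omega
          simp only [List.nil_append]
          rw [xr_other _ _ (by decide), xr_other _ _ (by decide), gr_zero,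
            xr_lead s'' 0, hl2]
          rw [lead_cons_one, hl2] at hv
          rw [List.drop_succ_cons] at hv
          rw [show xr (s''.drop b) 0 = xorMap ((runsA (s''.drop b) 0).map gr) from rfl]
          rw [show lead s'' = b from hl2] at *
          rw [hv]
          simp [xorMap, Nat.zero_xor]
    · rw [show runsA (ch :: s) c =
          if 0 < c then c :: runsA s 0 else runsA s 0 from by simp [runsA, hch]] at hr
      by_cases hc : 0 < c
      · rw [if_pos hc] at hr
        cases u with
        | nil =>
          simp only [List.nil_append] at hr
          have h1 : c = n := (List.cons.injEq _ _ _ _ ▸ hr).1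
          have := hcu rfl
          omega
        | cons r u' =>
          have h1 : r = c := ((List.cons.injEq _ _ _ _) ▸ hr).1.symm
          have h2 : runsA s 0 = u' ++ n :: v := by
            have := (List.cons.injEq _ _ _ _ ▸ hr).2
            simpa using this
          obtain ⟨p, q, hpq, hx⟩ := ih 0 u' n v h2 a b hab (fun _ => Nat.zero_le a)
          refine ⟨ch :: p, q, by rw [hpq]; rfl, ?_⟩
          rw [show (ch :: p) ++ '0' :: '0' :: q = ch :: (p ++ '0' :: '0' :: q) from rfl,
            xr_other _ _ hch, hx, h1, List.map_cons, xorMap_cons]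
          exact (Nat.xor_assoc _ _ _).symm
      · rw [if_neg hc] at hr
        obtain ⟨p, q, hpq, hx⟩ := ih 0 u n v hr a b hab (fun _ => Nat.zero_le a)
        refine ⟨ch :: p, q, by rw [hpq]; rfl, ?_⟩
        rw [show (ch :: p) ++ '0' :: '0' :: q = ch :: (p ++ '0' :: '0' :: q) from rfl,
          xr_other _ _ hch, hx, show c = 0 from by omega, gr_zero, Nat.zero_xor]

-- xor bookkeeping
lemma xor_split_elem (l : List Nat) (i : Nat) (h : (l.foldr (· ^^^ ·) 0).testBit i = true) :
    ∃ u y v, l = u ++ y :: v ∧ y.testBit i = true := by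
  induction l with
  | nil => simp [Nat.zero_testBit] at h
  | cons x l ih =>
    by_cases hx : x.testBit i = true
    · exact ⟨[], x, l, rfl, hx⟩
    · have hx' : x.testBit i = false := by simpa using hx
      rw [List.foldr_cons] at h
      rw [Nat.testBit_xor, hx'] at h
      simp only [Bool.false_xor] at h
      obtain ⟨u, y, v, hl, hy⟩ := ih h
      exact ⟨x :: u, y, v, by rw [hl, List.cons_append], hy⟩

-- ---- winning-move existence (K1) ----
lemma winning_move (s : List Char) (h : xr s 0 ≠ 0) :
    ∃ p q, s = p ++ '1' :: '1' :: q ∧ xr (p ++ '0' :: '0' :: q) 0 = 0 := by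
  obtain ⟨i, hbit, htop⟩ := Nat.exists_most_significant_bit h
  obtain ⟨u', y, v', hsplit, hy⟩ := xor_split_elem ((runsA s 0).map gr) i hbit
  obtain ⟨u, l2, hul, hmu, hrest⟩ := List.map_eq_append_iff.mp hsplit
  obtain ⟨n, v, hnv, hgn, hmv⟩ := List.map_eq_cons_iff.mp hrest
  have hyX : y ^^^ xr s 0 < y := by
    apply Nat.lt_of_testBit i
    · rw [Nat.testBit_xor, hy, hbit]; rfl
    · exact hy
    · intro j hj
      rw [Nat.testBit_xor, htop j hj]
      simp
  have hn2 : 2 ≤ n := by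
    by_contra hn
    have : gr n = 0 := gr_le_one n (by omega)
    rw [← hgn] at hyX
    omega
  obtain ⟨a, ha, haEq⟩ := grP2 (n - 2) (y ^^^ xr s 0) (by
    rw [show n - 2 + 2 = n from by omega, ← hgn] at *
    exact hyX)
  set b := n - 2 - a with hb
  have hruns : runsA s 0 = u ++ n :: v := by rw [hul, hnv]
  obtain ⟨p, q, hpq, hx⟩ := lift s 0 u n v hruns a b (by omega) (fun _ => Nat.zero_le a)
  refine ⟨p, q, hpq, ?_⟩
  rw [hx]
  have hX : xr s 0 = xorMap (u.map gr) ^^^ (y ^^^ xorMap (v.map gr)) := by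
    rw [show xr s 0 = xorMap ((runsA s 0).map gr) from rfl, hruns]
    rw [List.map_append, List.map_cons, xorMap_append, xorMap_cons, hgn]
  have hab : gr a ^^^ gr b = y ^^^ xr s 0 := by
    rw [hb, haEq]
  rw [show gr a ^^^ (gr b ^^^ xorMap (v.map gr))
      = (gr a ^^^ gr b) ^^^ xorMap (v.map gr) from (Nat.xor_assoc _ _ _).symm,
    hab, hX]
  refine Nat.eq_of_testBit_eq fun j => ?_
  simp only [Nat.testBit_xor, Nat.zero_testBit, Bool.xor_assoc]
  generalize (xorMap (u.map gr)).testBit j = b1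
  generalize y.testBit j = b2
  generalize (xorMap (v.map gr)).testBit j = b3
  cases b1 <;> cases b2 <;> cases b3 <;> rfl

-- ---- counting ones ----
lemma ones_append (p q : List Char) : ones (p ++ q) = ones p + ones q := by
  simp [ones, List.count_append]

lemma ones_cons_one (s : List Char) : ones ('1' :: s) = ones s + 1 := by
  simp [ones, List.count_cons]

lemma ones_cons_other {a : Char} (s : List Char) (h : a ≠ '1') : ones (a :: s) = ones s := by
  simp [ones, List.count_cons, h]

lemma ones_pair_le {s : List Char} (h : ['1', '1'] <:+: s) : 2 ≤ ones s := by
  have := h.sublist.count_le '1'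
  simpa [ones] using this

-- ---- the loop of A as an existential over decompositions ----
lemma dfsA_succ_iff (f : Nat) (s : List Char) (hp : ['1', '1'] <:+: s) :
    dfsA (f+1) s = true ↔ ∃ p q, s = p ++ '1' :: '1' :: q ∧ dfsA f (p ++ '0' :: '0' :: q) = false := by
  have hIn : PySem.Chars.isIn ['1', '1'] s = true := (PySem.Chars.isIn_iff_infix _ _).mpr hp
  rw [show dfsA (f+1) s
      = (List.range (s.length - 1)).any (fun i =>
          if PySem.List.pyGet? s (i : Int) = some '1' ∧ PySem.List.pyGet? s ((i : Int) + 1) = some '1' then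
            ! dfsA f (PySem.List.slice s none (some (i : Int)) ++ ['0', '0'] ++
                      PySem.List.slice s (some ((i : Int) + 2)) none)
          else false)
    from by simp [dfsA, hIn]]
  rw [List.any_eq_true]
  constructor
  · rintro ⟨i, hi, hbody⟩
    have hiR : i < s.length - 1 := List.mem_range.mp hi
    by_cases hP : PySem.List.pyGet? s (i : Int) = some '1' ∧ PySem.List.pyGet? s ((i : Int) + 1) = some '1'
    · obtain ⟨hP1, hP2⟩ := id hP
      rw [PySem.List.pyGet?_natCast] at hP1
      rw [show ((i : Int) + 1) = ((i + 1 : Nat) : Int) from by push_cast; ring,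
        PySem.List.pyGet?_natCast] at hP2
      obtain ⟨hlt1, hget1⟩ := List.getElem?_eq_some_iff.mp hP1
      obtain ⟨hlt2, hget2⟩ := List.getElem?_eq_some_iff.mp hP2
      have hdec : s = s.take i ++ '1' :: '1' :: s.drop (i + 2) := by
        conv_lhs => rw [← List.take_append_drop i s]
        congr 1
        rw [List.drop_eq_getElem_cons hlt1, hget1,
          List.drop_eq_getElem_cons hlt2, hget2]
      refine ⟨s.take i, s.drop (i + 2), hdec, ?_⟩
      rw [if_pos hP] at hbody
      rw [Bool.not_eq_eq_eq_not, Bool.not_true] at hbody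
      rw [PySem.List.slice_to_natCast,
        show ((i : Int) + 2) = ((i + 2 : Nat) : Int) from by push_cast; ring,
        PySem.List.slice_from_natCast, List.append_assoc] at hbody
      exact hbody
    · rw [if_neg hP] at hbody
      cases hbody
  · rintro ⟨p, q, hdec, hfalse⟩
    refine ⟨p.length, List.mem_range.mpr ?_, ?_⟩
    · rw [hdec]
      simp only [List.length_append, List.length_cons]
      omega
    · have hP1 : PySem.List.pyGet? s ((p.length : Nat) : Int) = some '1' := by
        rw [hdec]; exact PySem.List.pyGet?_append_length p _ '1'
      have hP2 : PySem.List.pyGet? s (((p.length : Nat) : Int) + 1) = some '1' := by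
        rw [hdec, show p ++ '1' :: '1' :: q = (p ++ ['1']) ++ '1' :: q from by simp,
          show ((p.length : Nat) : Int) + 1 = (((p ++ ['1']).length : Nat) : Int) from by
            simp]
        exact PySem.List.pyGet?_append_length (p ++ ['1']) _ '1'
      rw [if_pos ⟨hP1, hP2⟩]
      rw [PySem.List.slice_to_natCast,
        show ((p.length : Int) + 2) = ((p.length + 2 : Nat) : Int) from by push_cast; ring,
        PySem.List.slice_from_natCast]
      have htake : s.take p.length = p := by
        rw [hdec]; exact List.take_left
      have hdrop : s.drop (p.length + 2) = q := by
        rw [hdec, show p ++ '1' :: '1' :: q = (p ++ ['1', '1']) ++ q from by simp,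
          show p.length + 2 = (p ++ ['1', '1']).length from by simp]
        exact List.drop_left
      rw [htake, hdrop, List.append_assoc]
      simp only [List.cons_append, List.nil_append]
      rw [hfalse]
      rfl

-- ---- main equivalence ----
lemma dfsA_eq_xr : ∀ (f : Nat) (s : List Char), ones s ≤ f → (dfsA f s = true ↔ xr s 0 ≠ 0) := by
  intro f
  induction f with
  | zero =>
    intro s h0
    have hz : xr s 0 = 0 := by
      apply xr_eq_zero_of_noPair s 0
      intro hp
      simp only [List.replicate, List.nil_append] at hp
      have := ones_pair_le hp
      omega
    simp [dfsA, hz]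
  | succ f ih =>
    intro s hf
    by_cases hp : ['1', '1'] <:+: s
    · rw [dfsA_succ_iff f s hp]
      constructor
      · rintro ⟨p, q, hdec, hfalse⟩
        have hones : ones (p ++ '0' :: '0' :: q) ≤ f := by
          have h1 : ones s = ones p + ones q + 2 := by
            rw [hdec, ones_append, ones_cons_one, ones_cons_one]; omega
          have h2 : ones (p ++ '0' :: '0' :: q) = ones p + ones q := by
            rw [ones_append, ones_cons_other _ (by decide), ones_cons_other _ (by decide)]
          omega
        have hxz : xr (p ++ '0' :: '0' :: q) 0 = 0 := by
          by_contra hxx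
          have := (ih _ hones).mpr hxx
          rw [hfalse] at this
          cases this
        obtain ⟨a, b, hm⟩ := move_effect p 0 q
        rw [hxz, ← hdec] at hm
        intro hX0
        rw [hX0] at hm
        rw [Nat.zero_xor] at hm
        have hxor : gr (a + 2 + b) = gr a ^^^ gr b :=
          Nat.xor_eq_zero_iff.mp hm.symm
        have hP1 := grP1 (a + b) a (by omega)
        rw [show a + b - a = b from by omega, show a + b + 2 = a + 2 + b from by omega] at hP1
        exact hP1 hxor
      · intro hX
        obtain ⟨p, q, hdec, hz⟩ := winning_move s hX
        refine ⟨p, q, hdec, ?_⟩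
        have hones : ones (p ++ '0' :: '0' :: q) ≤ f := by
          have h1 : ones s = ones p + ones q + 2 := by
            rw [hdec, ones_append, ones_cons_one, ones_cons_one]; omega
          have h2 : ones (p ++ '0' :: '0' :: q) = ones p + ones q := by
            rw [ones_append, ones_cons_other _ (by decide), ones_cons_other _ (by decide)]
          omega
        cases hd : dfsA f (p ++ '0' :: '0' :: q)
        · rfl
        · exact absurd ((ih _ hones).mp hd) (by simp [hz])
    · have hz : xr s 0 = 0 := by
        apply xr_eq_zero_of_noPair s 0
        simpa using hp
      have hIn : PySem.Chars.isIn ['1', '1'] s = false := (PySem.Chars.isIn_eq_false_iff _ _).mpr hp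
      simp [dfsA, hIn, hz]

-- ---- bridging B's loops to runsA / gr / xr ----
lemma runsB_eq : ∀ (s : List Char) (acc : List Nat) (c : Nat),
    (if 0 < (s.foldl
        (fun acc ch =>
          if ch = '1' then (acc.1, acc.2 + 1)
          else if 0 < acc.2 then (acc.1 ++ [acc.2], 0) else (acc.1, 0)) (acc, c)).2
     then (s.foldl
        (fun acc ch =>
          if ch = '1' then (acc.1, acc.2 + 1)
          else if 0 < acc.2 then (acc.1 ++ [acc.2], 0) else (acc.1, 0)) (acc, c)).1
        ++ [(s.foldl
        (fun acc ch =>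
          if ch = '1' then (acc.1, acc.2 + 1)
          else if 0 < acc.2 then (acc.1 ++ [acc.2], 0) else (acc.1, 0)) (acc, c)).2]
     else (s.foldl
        (fun acc ch =>
          if ch = '1' then (acc.1, acc.2 + 1)
          else if 0 < acc.2 then (acc.1 ++ [acc.2], 0) else (acc.1, 0)) (acc, c)).1)
    = acc ++ runsA s c := by
  intro s
  induction s with
  | nil =>
    intro acc c
    by_cases hc : 0 < c <;> simp [runsA, hc]
  | cons ch s ih =>
    intro acc c
    rw [List.foldl_cons]
    by_cases hch : ch = '1'
    · subst hch
      rw [show (if ('1' : Char) = '1' then ((acc, c).1, (acc, c).2 + 1)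
          else if 0 < (acc, c).2 then ((acc, c).1 ++ [(acc, c).2], 0) else ((acc, c).1, 0))
          = (acc, c + 1) from by simp]
      rw [ih acc (c+1)]
      simp [runsA]
    · rw [show (if ch = '1' then ((acc, c).1, (acc, c).2 + 1)
          else if 0 < (acc, c).2 then ((acc, c).1 ++ [(acc, c).2], 0) else ((acc, c).1, 0))
          = if 0 < c then (acc ++ [c], 0) else (acc, 0) from by simp [hch]]
      by_cases hc : 0 < c
      · rw [if_pos hc, ih (acc ++ [c]) 0,
          show runsA (ch :: s) c = c :: runsA s 0 from by simp [runsA, hch, hc]]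
        simp
      · rw [if_neg hc, ih acc 0, show c = 0 from by omega]
        simp [runsA, hch]

lemma getD_set_nat (l : List Nat) (n v k : Nat) :
    (l.set n v).getD k 0 = if k = n ∧ n < l.length then v else l.getD k 0 := by
  by_cases h1 : n = k
  · subst h1
    by_cases h2 : n < l.length
    · simp [List.getD, List.getElem?_set, h2]
    · simp [List.getD, List.getElem?_set, h2]
  · have h3 : ¬ (k = n ∧ n < l.length) := fun hh => h1 hh.1.symm
    simp [List.getD, List.getElem?_set, h1, h3]

lemma gTab_aux : ∀ (cnt st : Nat) (g : List Nat), 2 ≤ st → st + cnt ≤ g.length →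
    (∀ k, k < st → g.getD k 0 = gr k) → (∀ k, st ≤ k → g.getD k 0 = 0) →
    ∀ k, k < st + cnt →
      ((List.range' st cnt).foldl
        (fun g n =>
          let moves := (List.range (n - 1)).map (fun a => g.getD a 0 ^^^ g.getD (n - 2 - a) 0)
          g.set n (mexLoop (moves.length + 1) 0 moves)) g).getD k 0 = gr k := by
  intro cnt
  induction cnt with
  | zero =>
    intro st g h2 hlen hlo hhi k hk
    simpa using hlo k (by omega)
  | succ cnt ih =>
    intro st g h2 hlen hlo hhi k hk
    rw [List.range'_succ, List.foldl_cons]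
    have hmoves : (List.range (st - 1)).map (fun a => g.getD a 0 ^^^ g.getD (st - 2 - a) 0)
        = (List.range (st - 1)).map (fun a => gr a ^^^ gr (st - 2 - a)) := by
      apply List.map_congr_left
      intro a ha
      have ha' : a < st - 1 := List.mem_range.mp ha
      rw [hlo a (by omega), hlo (st - 2 - a) (by omega)]
    have hstep : (let moves := (List.range (st - 1)).map (fun a => g.getD a 0 ^^^ g.getD (st - 2 - a) 0); g.set st (mexLoop (moves.length + 1) 0 moves)) = g.set st (gr st) := by
      show g.set st _ = g.set st (gr st)
      congr 1
      rw [hmoves]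
      have h1 : st - 1 = (st - 2) + 1 := by omega
      rw [h1]
      have h2 : ((List.range ((st - 2) + 1)).map
          (fun a => gr a ^^^ gr (st - 2 - a))).length + 1 = (st - 2) + 2 := by
        simp
      rw [h2, ← gr_moves (st - 2), show (st - 2) + 2 = st from by omega]
    rw [hstep]
    apply ih (st + 1) (g.set st (gr st)) (by omega) (by simp [List.length_set]; omega)
    · intro j hj
      rw [getD_set_nat]
      by_cases hjs : j = st
      · subst hjs
        rw [if_pos ⟨rfl, by omega⟩]
      · rw [if_neg (by tauto)]
        exact hlo j (by omega)
    · intro j hj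
      rw [getD_set_nat, if_neg (by omega)]
      exact hhi j (by omega)
    · omega

lemma getD_replicate_zero (n k : Nat) : (List.replicate n (0 : Nat)).getD k 0 = 0 := by
  by_cases h : k < n
  · simp [List.getD, List.getElem?_replicate, h]
  · simp [List.getD, List.getElem?_replicate, h]

lemma gTab_getD (m k : Nat) (h : k ≤ m) : (gTab m).getD k 0 = gr k := by
  rcases Nat.lt_or_ge m 2 with hm | hm
  · have : gTab m = List.replicate (m + 1) 0 := by
      unfold gTab
      rw [show m - 1 = 0 from by omega]
      rfl
    rw [this, getD_replicate_zero]
    exact (gr_le_one k (by omega)).symm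
  · unfold gTab
    apply gTab_aux (m - 1) 2 (List.replicate (m + 1) 0) (by omega)
      (by simp [List.length_replicate]; omega)
    · intro j hj
      rw [getD_replicate_zero]
      exact (gr_le_one j (by omega)).symm
    · intro j _
      exact getD_replicate_zero _ _
    · omega

lemma foldl_xor_eq (l : List Nat) (x : Nat) :
    l.foldl (fun x r => x ^^^ gr r) x = x ^^^ xorMap (l.map gr) := by
  induction l generalizing x with
  | nil => simp [xorMap]
  | cons r l ih =>
    rw [List.foldl_cons, ih, List.map_cons, xorMap_cons, ← Nat.xor_assoc]

lemma solve_alt_eq (nums : List Int) :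
    solve_alt nums = decide (xr (PySem.Str.join "" (nums.map PySem.Int.toStr)).toList 0 ≠ 0) := by
  show (let s := PySem.Str.join "" (nums.map PySem.Int.toStr)
        let rc := runsB s.toList
        let runs := if 0 < rc.2 then rc.1 ++ [rc.2] else rc.1
        let m := runs.foldl max 0
        let g := gTab m
        decide (runs.foldl (fun x r => x ^^^ g.getD r 0) 0 ≠ 0)) = _
  set s := PySem.Str.join "" (nums.map PySem.Int.toStr) with hs
  have hruns : (if 0 < (runsB s.toList).2 then (runsB s.toList).1 ++ [(runsB s.toList).2]
      else (runsB s.toList).1) = runsA s.toList 0 := by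
    have := runsB_eq s.toList [] 0
    simpa [runsB] using this
  simp only []
  rw [hruns]
  have hmax : ∀ r ∈ runsA s.toList 0, r ≤ (runsA s.toList 0).foldl max 0 :=
    fun r hr => (PySem.List.le_foldl_max (runsA s.toList 0) 0).2 r hr
  have hcongr : (runsA s.toList 0).foldl
      (fun x r => x ^^^ (gTab ((runsA s.toList 0).foldl max 0)).getD r 0) 0
      = (runsA s.toList 0).foldl (fun x r => x ^^^ gr r) 0 := by
    apply PySem.List.foldl_congr_mem
    intro acc r hr
    rw [gTab_getD _ r (hmax r hr)]
  rw [hcongr, foldl_xor_eq, Nat.zero_xor]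
  rfl

-- ===== VERDICT (by name: the statement is the Claim_ definition above) =====
theorem solve_spec : Claim_equal_solve := by
  intro nums _
  unfold Spec_solve
  rw [solve_alt_eq]
  show dfsA ((PySem.Str.join "" (nums.map PySem.Int.toStr)).toList.length + 1)
      (PySem.Str.join "" (nums.map PySem.Int.toStr)).toList = _
  have h := dfsA_eq_xr ((PySem.Str.join "" (nums.map PySem.Int.toStr)).toList.length + 1)
      (PySem.Str.join "" (nums.map PySem.Int.toStr)).toList
      (Nat.le_succ_of_le List.count_le_length)
  by_cases hx : xr (PySem.Str.join "" (nums.map PySem.Int.toStr)).toList 0 ≠ 0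
  · rw [h.mpr hx, decide_eq_true hx]
  · rw [decide_eq_false hx]
    cases hd : dfsA ((PySem.Str.join "" (nums.map PySem.Int.toStr)).toList.length + 1)
        (PySem.Str.join "" (nums.map PySem.Int.toStr)).toList
    · rfl
    · exact absurd (h.mp hd) hx
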